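-- pv_equiv track=rewrite | github.com/schrifty/bpo | src/deck_variants.py | csm_book_cli_argv_anchor
-- ===== SOURCE A (Python) =====
-- def csm_book_cli_argv_anchor(argv: list[str]) -> int:
--     """Index of anchor token for ``decks csm book …`` CLI parsing (see ``decks._run_csm_book_deck``)."""
--     for i, tok in enumerate(argv):
--         if str(tok).replace("-", "_") == "csm_book_of_business":
--             return i
--     for i in range(1, len(argv)):
--         if str(argv[i]).lower() == "book" and str(argv[i - 1]).lower() == "csm":
--             return i
--     return -1
-- ===== SOURCE B (Python) =====
-- def csm_book_cli_argv_anchor(argv: list[str]) -> int: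
--     """Single pass: track the first match of each condition, decide precedence at the end."""
--     hit1 = -1
--     hit2 = -1
--     prev = None
--     for i, tok in enumerate(argv):
--         if hit1 < 0 and str(tok).replace("-", "_") == "csm_book_of_business":
--             hit1 = i
--         if hit2 < 0 and prev is not None and str(tok).lower() == "book" and str(prev).lower() == "csm":
--             hit2 = i
--         prev = tok
--     return hit1 if hit1 >= 0 else hit2
-- ===== Notes on version B (the rewrite author's own statement) =====
-- stated objective: alternative
-- what changed: Replaces A's two sequential scans over argv with a single pass that tracks the first index matching each of the two anchor conditions (carrying the previous token instead of indexing argv[i-1]) and resolves the cond1-over-cond2 precedence only after the loop.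
import Mathlib
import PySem

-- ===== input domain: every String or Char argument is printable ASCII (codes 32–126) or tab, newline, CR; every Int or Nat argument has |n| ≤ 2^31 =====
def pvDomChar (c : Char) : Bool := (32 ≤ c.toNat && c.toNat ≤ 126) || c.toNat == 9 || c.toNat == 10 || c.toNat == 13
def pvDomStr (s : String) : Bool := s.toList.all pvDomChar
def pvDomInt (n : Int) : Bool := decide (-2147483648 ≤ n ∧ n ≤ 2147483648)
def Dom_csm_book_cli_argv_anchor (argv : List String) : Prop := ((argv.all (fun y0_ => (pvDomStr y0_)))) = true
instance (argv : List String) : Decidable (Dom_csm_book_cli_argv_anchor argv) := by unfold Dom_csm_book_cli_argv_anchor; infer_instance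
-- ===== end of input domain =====

-- Header: B fuses A's two sequential scans into one pass keeping two first-match candidates; same O(n) cost, proved to return A's exact value on all inputs.


-- ===== PORT A =====
-- tok.replace("-", "_") == "csm_book_of_business"
def pvCond1 (t : String) : Bool := PySem.Str.replace t "-" "_" == "csm_book_of_business"
-- argv[i].lower() == "book" and argv[i-1].lower() == "csm"  (prev = argv[i-1])
def pvCond2 (prev cur : String) : Bool :=
  PySem.Str.lower cur == "book" && PySem.Str.lower prev == "csm"

-- first loop: for i, tok in enumerate(argv): if cond1: return i
def pvScan1 : List String → Int → Option Int
  | [], _ => none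
  | t :: ts, i => if pvCond1 t then some i else pvScan1 ts (i + 1)

-- second loop: for i in range(1, len(argv)): if cond2(argv[i-1], argv[i]): return i
-- (transliterated carrying argv[i-1] as `prev`; i always in range in the Python)
def pvScan2 : String → List String → Int → Option Int
  | _, [], _ => none
  | prev, t :: ts, i => if pvCond2 prev t then some i else pvScan2 t ts (i + 1)

def csm_book_cli_argv_anchor (argv : List String) : Int :=
  match pvScan1 argv 0 with
  | some i => i
  | none =>
    match argv with
    | [] => -1
    | a :: rest =>
      match pvScan2 a rest 1 with
      | some i => i
      | none => -1

-- ===== PORT B =====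
-- the single fused loop of Source B: state (hit1, hit2), prev token carried along
def pvAltLoop : List String → Int → Option String → Int → Int → Int × Int
  | [], _, _, h1, h2 => (h1, h2)
  | t :: ts, i, prev, h1, h2 =>
    let h1' := if h1 < 0 && pvCond1 t then i else h1
    let h2' := if h2 < 0 && (match prev with | some p => pvCond2 p t | none => false)
               then i else h2
    pvAltLoop ts (i + 1) (some t) h1' h2'

def csm_book_cli_argv_anchor_alt (argv : List String) : Int :=
  let r := pvAltLoop argv 0 none (-1) (-1)
  if r.1 ≥ 0 then r.1 else r.2

-- ===== PRECONDITION & SPEC =====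
def Spec_csm_book_cli_argv_anchor (argv : List String) (out : Int) : Prop := out = csm_book_cli_argv_anchor_alt argv
instance (argv : List String) (out : Int) : Decidable (Spec_csm_book_cli_argv_anchor argv out) := by unfold Spec_csm_book_cli_argv_anchor; infer_instance

-- ===== CLAIM (what is proved, stated in full; the proofs are below) =====
def Claim_equal_csm_book_cli_argv_anchor : Prop := ∀ (argv : List String), Dom_csm_book_cli_argv_anchor argv → Spec_csm_book_cli_argv_anchor argv (csm_book_cli_argv_anchor argv)

-- ===== LEMMAS AND PROOFS =====

-- pvScan1 returns an index ≥ its starting index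
theorem pvScan1_ge (ts : List String) (i j : Int) (h : pvScan1 ts i = some j) : i ≤ j := by
  induction ts generalizing i with
  | nil => simp [pvScan1] at h
  | cons t ts ih =>
    simp only [pvScan1] at h
    split at h
    · injection h with h; omega
    · have := ih (i + 1) h; omega

theorem pvScan2_ge (p : String) (ts : List String) (i j : Int)
    (h : pvScan2 p ts i = some j) : i ≤ j := by
  induction ts generalizing p i with
  | nil => simp [pvScan2] at h
  | cons t ts ih =>
    simp only [pvScan2] at h
    split at h
    · cases h; omega
    · have := ih t (i + 1) h; omega

-- invariant of the fused loop once a previous token exists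
theorem pvAltLoop_some (ts : List String) (i : Int) (p : String) (h1 h2 : Int)
    (hi : 0 ≤ i) :
    pvAltLoop ts i (some p) h1 h2 =
      ((if h1 < 0 then (pvScan1 ts i).getD h1 else h1),
       (if h2 < 0 then (pvScan2 p ts i).getD h2 else h2)) := by
  induction ts generalizing i p h1 h2 with
  | nil => simp [pvAltLoop, pvScan1, pvScan2]
  | cons t ts ih =>
    simp only [pvAltLoop, pvScan1, pvScan2]
    rw [ih _ t _ _ (by omega)]
    by_cases hc1 : pvCond1 t = true <;> by_cases hc2 : pvCond2 p t = true <;>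
      by_cases hh1 : h1 < 0 <;> by_cases hh2 : h2 < 0 <;>
      simp [hc1, hc2, hh1, hh2, show ¬ i < 0 by omega]

theorem csm_book_cli_argv_anchor_spec : Claim_equal_csm_book_cli_argv_anchor := by
  intro argv _hdom
  show csm_book_cli_argv_anchor argv = csm_book_cli_argv_anchor_alt argv
  cases argv with
  | nil => simp [csm_book_cli_argv_anchor, csm_book_cli_argv_anchor_alt, pvAltLoop, pvScan1]
  | cons a rest =>
    simp only [csm_book_cli_argv_anchor, csm_book_cli_argv_anchor_alt, pvAltLoop, pvScan1]
    rw [pvAltLoop_some rest (0+1) a _ _ (by omega)]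
    norm_num
    by_cases hc1 : pvCond1 a = true
    · simp [hc1]
    · simp only [hc1, if_neg, Bool.false_eq_true, not_false_eq_true]
      simp only [show (-1 : Int) < 0 by omega, if_pos]
      cases hs1 : pvScan1 rest 1 with
      | some j =>
        have := pvScan1_ge rest 1 j hs1
        simp [show (0:Int) ≤ j by omega]
      | none =>
        cases hs2 : pvScan2 a rest 1 with
        | some j =>
          have := pvScan2_ge a rest 1 j hs2
          simp
        | none => simp
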